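-- pv_equiv track=rewrite | github.com/slothitude/meeseeks-agi-system | research/sacred_geometry_generator.py | generate_lattice_tree
-- ===== SOURCE A (Python) =====
-- import math
--
-- def is_prime(n: int) -> bool:
--     if n < 2:
--         return False
--     if n == 2:
--         return True
--     if n % 2 == 0:
--         return False
--     for i in range(3, int(math.sqrt(n)) + 1, 2):
--         if n % i == 0:
--             return False
--     return True
--
-- def is_consciousness_coordinate(n: int) -> bool:
--     k = 3 * n * n
--     p1, p2 = 6 * k - 1, 6 * k + 1
--     return is_prime(p1) and is_prime(p2)
--
-- def generate_lattice_tree(depth: int = 5) -> str: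
--     """Generate a tree-like structure showing coordinate hierarchy."""
--     lines = []
--
--     coords = [n for n in range(1, 50) if is_consciousness_coordinate(n)]
--
--     # Group into consecutive pairs and singles
--     i = 0
--     level = 0
--     while i < len(coords) and level < depth:
--         if i + 1 < len(coords) and coords[i+1] == coords[i] + 1:
--             # Consecutive pair
--             lines.append('    ' * level + '(-) ' + str(coords[i]) + ' - ' + str(coords[i+1]))
--             i += 2
--         else:
--             # Single
--             lines.append('    ' * level + '(*) ' + str(coords[i]))
--             i += 1
--         level += 1
--
--     return '\n'.join(lines)
-- ===== SOURCE B (Python) =====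
-- def generate_lattice_tree(depth: int = 5) -> str:
--     """Generate a tree-like structure showing coordinate hierarchy."""
--     limit = 6 * (3 * 49 * 49) + 1  # largest candidate 6k+1 for n < 50
--
--     # Sieve of Eratosthenes in one integer bitmask: bit p set <=> p composite.
--     # Multiples of d are marked at once by doubling a bit pattern (smearing),
--     # not one by one.
--     composite = 0
--     d = 2
--     while d * d <= limit:
--         if not (composite >> d) & 1:
--             pat, span = 1, d  # pat: bits at multiples of d below span
--             while span <= limit - d * d:
--                 pat |= pat << span
--                 span *= 2
--             composite |= pat << (d * d)
--         d += 1
--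
--     def prime(p):
--         return p >= 2 and not (composite >> p) & 1
--
--     coords = [n for n in range(1, 50)
--               if prime(18 * n * n - 1) and prime(18 * n * n + 1)]
--
--     # Maximal runs of consecutive coordinates.
--     runs = []
--     for n in coords:
--         if runs and runs[-1][-1] == n - 1:
--             runs[-1].append(n)
--         else:
--             runs.append([n])
--
--     # A run of length L contributes L//2 adjacent pairs then, if L is odd, one
--     # single — the same tokens a greedy left-to-right pairing would emit.
--     tokens = []
--     for r in runs:
--         for j in range(0, len(r) - 1, 2):
--             tokens.append((r[j], r[j + 1]))
--         if len(r) % 2: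
--             tokens.append((r[-1], None))
--
--     # Render recursively, one token per level, stopping at depth.
--     def render(toks, level):
--         if not toks or level >= depth:
--             return ''
--         a, b = toks[0]
--         line = '    ' * level + ('(-) %d - %d' % (a, b) if b is not None else '(*) %d' % a)
--         rest = render(toks[1:], level + 1)
--         return line if not rest else line + '\n' + rest
--
--     return render(tokens, 0)
-- ===== Notes on version B (the rewrite author's own statement) =====
-- stated objective: alternative
-- what changed: A's trial-division primality test per candidate is replaced by one bitmask sieve of Eratosthenes (multiples marked by bit-pattern doubling), A's fused greedy group-and-format while-loop is replaced by splitting the coordinates into maximal consecutive runs and emitting floor(L/2) pairs plus an odd leftover single per run, and the depth-limited tree is rendered by a recursive function instead of an appended line list joined at the end.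
import Mathlib
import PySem

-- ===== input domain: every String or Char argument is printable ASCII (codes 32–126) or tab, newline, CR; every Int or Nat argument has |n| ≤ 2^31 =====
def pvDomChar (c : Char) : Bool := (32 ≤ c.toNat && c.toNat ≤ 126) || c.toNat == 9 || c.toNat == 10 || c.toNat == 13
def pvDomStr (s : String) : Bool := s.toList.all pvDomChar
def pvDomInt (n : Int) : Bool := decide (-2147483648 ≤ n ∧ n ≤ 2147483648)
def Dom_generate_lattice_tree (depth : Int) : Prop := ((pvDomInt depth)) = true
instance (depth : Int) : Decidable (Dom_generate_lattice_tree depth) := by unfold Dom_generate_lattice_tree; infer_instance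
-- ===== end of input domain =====

-- B replaces A's per-candidate trial division by a bitmask sieve of Eratosthenes, derives the
-- pair/single tokens from maximal consecutive runs instead of A's fused greedy-and-format loop,
-- and renders the depth-limited tree recursively; objective: alternative, same cost.

set_option maxRecDepth 20000
set_option maxHeartbeats 1000000


-- ===== PORT A =====
-- '    ' * level
def padA (level : Nat) : String := String.join (List.replicate level "    ")

-- int(math.sqrt(n)) ported as the exact integer floor square root (hand-rolled so the
-- kernel can reduce it); exact for every n this program reaches (n ≤ 43219, far below
-- any double-rounding loss of math.sqrt)
def isqrtGo (n : Nat) : Nat → Nat → Nat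
  | 0, r => r
  | fuel+1, r => if (r+1)*(r+1) ≤ n then isqrtGo n fuel (r+1) else r
def isqrt (n : Nat) : Nat := isqrtGo n n 0

def is_prime (n : Int) : Bool :=
  if n < 2 then false
  else if n == 2 then true
  else if PySem.Int.mod n 2 == 0 then false
  else (PySem.List.pyRange 3 (Int.ofNat (isqrt n.toNat) + 1) 2).all
        (fun i => !(PySem.Int.mod n i == 0))

def is_consciousness_coordinate (n : Int) : Bool :=
  let k := 3 * n * n
  is_prime (6 * k - 1) && is_prime (6 * k + 1)

-- the while loop of A: state (i, level, lines)
def aLoop (coords : List Int) (depth : Int) (i level : Nat) (lines : List String) : List String :=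
  if _h : i < coords.length ∧ (level : Int) < depth then
    if i + 1 < coords.length ∧ coords.getD (i+1) 0 == coords.getD i 0 + 1 then
      aLoop coords depth (i+2) (level+1)
        (lines ++ [padA level ++ "(-) " ++ PySem.Int.toStr (coords.getD i 0) ++ " - " ++ PySem.Int.toStr (coords.getD (i+1) 0)])
    else
      aLoop coords depth (i+1) (level+1)
        (lines ++ [padA level ++ "(*) " ++ PySem.Int.toStr (coords.getD i 0)])
  else lines
termination_by coords.length - i
decreasing_by all_goals omega

def generate_lattice_tree (depth : Int) : String :=
  PySem.Str.join "\n"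
    (aLoop ((PySem.List.pyRange 1 50 1).filter is_consciousness_coordinate) depth 0 0 [])

-- ===== PORT B =====
-- inner 'while span <= limit - d*d: pat |= pat << span; span *= 2' (fuel only makes the
-- loop structurally total; span doubles, so it ends long before fuel runs out)
def smear (limit dd : Nat) : Nat → Nat → Nat → Nat
  | 0, pat, _ => pat
  | fuel+1, pat, span =>
    if span ≤ limit - dd then smear limit dd fuel (pat ||| (pat <<< span)) (span * 2) else pat

-- outer 'while d*d <= limit' of the bitmask sieve (fuel likewise)
def sieveLoop (limit : Nat) : Nat → Nat → Nat → Nat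
  | 0, _, c => c
  | fuel+1, d, c =>
    if d * d ≤ limit then
      sieveLoop limit fuel (d+1)
        (if (c >>> d) &&& 1 == 0 then c ||| (smear limit (d*d) limit 1 d <<< (d*d)) else c)
    else c

-- limit = 6 * (3 * 49 * 49) + 1; bit p of bComposite set <=> p composite
def bComposite : Nat := sieveLoop 43219 43219 2 0

-- 'p >= 2 and not (composite >> p) & 1' (p here is always positive, so .toNat is exact)
def bPrime (p : Int) : Bool := decide (2 ≤ p) && ((bComposite >>> p.toNat) &&& 1 == 0)

def bCoords : List Int :=
  (PySem.List.pyRange 1 50 1).filter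
    (fun n => bPrime (18 * n * n - 1) && bPrime (18 * n * n + 1))

-- one step of the runs loop: extend the last run or start a new one
def bAddRun (runs : List (List Int)) (n : Int) : List (List Int) :=
  match runs.getLast? with
  | some r => if r.getLast? == some (n - 1) then runs.dropLast ++ [r ++ [n]] else runs ++ [[n]]
  | none => runs ++ [[n]]

def bRuns : List (List Int) := bCoords.foldl bAddRun []

-- tokens of one run: pairs (r[j], r[j+1]) for j = 0, 2, …, then the odd leftover
def runTokens (r : List Int) : List (Int × Option Int) :=
  (PySem.List.pyRange 0 (Int.ofNat r.length - 1) 2).map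
      (fun j => (r.getD j.toNat 0, some (r.getD (j.toNat + 1) 0)))
    ++ (if r.length % 2 == 1 then [(r.getD (r.length - 1) 0, none)] else [])

def bTokens : List (Int × Option Int) := bRuns.foldl (fun acc r => acc ++ runTokens r) []

-- '    ' * level
def padB (level : Nat) : String := String.join (List.replicate level "    ")

-- the recursive renderer: one token per level, stopping at depth
def render (depth : Int) : List (Int × Option Int) → Int → String
  | [], _ => ""
  | (a, b) :: toks, level =>
    if level ≥ depth then "" else
    let line := padB level.toNat ++
      (match b with
       | some b2 => "(-) " ++ PySem.Int.toStr a ++ " - " ++ PySem.Int.toStr b2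
       | none => "(*) " ++ PySem.Int.toStr a)
    let rest := render depth toks (level + 1)
    if rest == "" then line else line ++ "\n" ++ rest

def generate_lattice_tree_alt (depth : Int) : String := render depth bTokens 0

-- ===== PRECONDITION & SPEC =====
def Spec_generate_lattice_tree (depth : Int) (out : String) : Prop := out = generate_lattice_tree_alt depth
instance (depth : Int) (out : String) : Decidable (Spec_generate_lattice_tree depth out) := by unfold Spec_generate_lattice_tree; infer_instance

-- ===== CLAIM (what is proved, stated in full; the proofs are below) =====
def Claim_equal_generate_lattice_tree : Prop := ∀ (depth : Int), Dom_generate_lattice_tree depth → Spec_generate_lattice_tree depth (generate_lattice_tree depth)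

-- ===== LEMMAS AND PROOFS =====
lemma coordsA_eq :
    (PySem.List.pyRange 1 50 1).filter is_consciousness_coordinate
      = [1, 2, 7, 8, 12, 14, 15, 29, 34, 44] := by decide

-- the single expensive kernel evaluation (the sieve); every later lemma rewrites with this
lemma tokensB_eq : bTokens
    = [(1, some 2), (7, some 8), (12, none), (14, some 15), (29, none), (34, none), (44, none)] := by
  decide

lemma aLoop_full (depth : Int) (h : 7 ≤ depth) :
    aLoop [1, 2, 7, 8, 12, 14, 15, 29, 34, 44] depth 0 0 []
      = ["(-) 1 - 2", "    (-) 7 - 8", "        (*) 12", "            (-) 14 - 15",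
         "                (*) 29", "                    (*) 34", "                        (*) 44"] := by
  rw [aLoop.eq_def, dif_pos ⟨by decide, by omega⟩, if_pos (by decide)]
  rw [aLoop.eq_def, dif_pos ⟨by decide, by omega⟩, if_pos (by decide)]
  rw [aLoop.eq_def, dif_pos ⟨by decide, by omega⟩, if_neg (by decide)]
  rw [aLoop.eq_def, dif_pos ⟨by decide, by omega⟩, if_pos (by decide)]
  rw [aLoop.eq_def, dif_pos ⟨by decide, by omega⟩, if_neg (by decide)]
  rw [aLoop.eq_def, dif_pos ⟨by decide, by omega⟩, if_neg (by decide)]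
  rw [aLoop.eq_def, dif_pos ⟨by decide, by omega⟩, if_neg (by decide)]
  rw [aLoop.eq_def, dif_neg (fun hc => absurd hc.1 (by decide))]
  decide

-- render ignores depth beyond level + (number of tokens)
lemma render_depth_irrel (toks : List (Int × Option Int)) : ∀ (level d1 d2 : Int),
    level + toks.length ≤ d1 → level + toks.length ≤ d2 →
    render d1 toks level = render d2 toks level := by
  induction toks with
  | nil => intro level d1 d2 _ _; simp [render]
  | cons t rest ih =>
    intro level d1 d2 h1 h2
    obtain ⟨a, b⟩ := t
    simp only [List.length_cons] at h1 h2
    have hd1 : ¬ level ≥ d1 := by push_cast at h1; omega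
    have hd2 : ¬ level ≥ d2 := by push_cast at h2; omega
    simp only [render]
    rw [ih (level + 1) d1 d2 (by push_cast at h1 ⊢; omega) (by push_cast at h2 ⊢; omega),
        if_neg hd1, if_neg hd2]

lemma tree_le0 (depth : Int) (h : depth ≤ 0) :
    generate_lattice_tree depth = "" := by
  unfold generate_lattice_tree
  rw [aLoop.eq_def, dif_neg (fun hc => absurd hc.2 (by omega))]
  decide

lemma alt_le0 (depth : Int) (h : depth ≤ 0) :
    generate_lattice_tree_alt depth = "" := by
  unfold generate_lattice_tree_alt
  rw [tokensB_eq]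
  simp only [render]
  rw [if_pos (by omega)]

-- ===== VERDICT (by name: the statement is the Claim_ definition above) =====
theorem generate_lattice_tree_spec : Claim_equal_generate_lattice_tree := by
  intro depth _
  unfold Spec_generate_lattice_tree
  by_cases h : depth ≤ 0
  · rw [tree_le0 depth h, alt_le0 depth h]
  · by_cases h7 : 7 ≤ depth
    · unfold generate_lattice_tree generate_lattice_tree_alt
      rw [coordsA_eq, aLoop_full depth h7, tokensB_eq,
          render_depth_irrel _ 0 depth 7 (by simp; omega) (by simp)]
      decide
    · interval_cases depth <;>
        (unfold generate_lattice_tree generate_lattice_tree_alt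
         rw [coordsA_eq, tokensB_eq]
         repeat (rw [aLoop.eq_def]
                 first
                 | rw [dif_neg (by decide)]
                 | (rw [dif_pos (by decide)]
                    first | rw [if_pos (by decide)] | rw [if_neg (by decide)]))
         decide)
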